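-- pv_equiv track=rewrite | github.com/ponduripradeep-collab/pharma-graphrag-pilot | streamlit_app.py | _split_into_batch_blocks
-- ===== SOURCE A (Python) =====
-- def _split_into_batch_blocks(answer: str) -> tuple[list[str], list[list[str]]]:
--     """
--     Splits agent output into:
--     - header lines (before the first 'Batch ...' line)
--     - batch blocks (each starts at a line whose left-stripped text begins with 'Batch ')
--
--     Each batch block includes all lines until the next batch header line.
--     """
--     if not answer:
--         return [], []
--
--     lines = answer.splitlines()
--     start_indices: list[int] = []
--     for i, line in enumerate(lines):
--         if line.lstrip().startswith("Batch "):
--             start_indices.append(i)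
--
--     if not start_indices:
--         return lines, []
--
--     header = lines[: start_indices[0]]
--     blocks: list[list[str]] = []
--     for idx, start_i in enumerate(start_indices):
--         end_i = start_indices[idx + 1] if idx + 1 < len(start_indices) else len(lines)
--         blocks.append(lines[start_i:end_i])
--     return header, blocks
-- ===== SOURCE B (Python) =====
-- def _split_into_batch_blocks(answer: str) -> tuple[list[str], list[list[str]]]:
--     header: list[str] = []
--     blocks: list[list[str]] = []
--     current = None
--     for line in answer.splitlines():
--         if line.lstrip().startswith("Batch "):
--             if current is not None:
--                 blocks.append(current)
--             current = [line]
--         elif current is not None: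
--             current.append(line)
--         else:
--             header.append(line)
--     if current is not None:
--         blocks.append(current)
--     return header, blocks
-- ===== Notes on version B (the rewrite author's own statement) =====
-- stated objective: simpler
-- what changed: B replaces A's two-phase index-table-and-slicing approach (collect all batch-start indices, then slice between consecutive indices) with a single pass over the lines that routes each line into the header, a freshly started block, or the current block.
import Mathlib
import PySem

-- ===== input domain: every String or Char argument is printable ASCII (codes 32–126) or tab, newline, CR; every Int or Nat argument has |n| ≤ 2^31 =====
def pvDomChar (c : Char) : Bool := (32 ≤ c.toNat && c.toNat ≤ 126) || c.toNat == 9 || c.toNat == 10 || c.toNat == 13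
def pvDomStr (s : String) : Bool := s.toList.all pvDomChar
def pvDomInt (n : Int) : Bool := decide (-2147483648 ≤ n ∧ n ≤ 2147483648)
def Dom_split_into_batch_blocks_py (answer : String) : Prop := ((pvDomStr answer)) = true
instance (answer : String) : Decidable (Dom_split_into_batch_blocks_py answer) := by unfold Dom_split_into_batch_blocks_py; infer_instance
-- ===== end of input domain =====

-- B replaces A's index table + slicing with a single pass that maintains the current block; equal return value, stated as the claim below.

-- ===== PORT A =====
def pvIsBatch (line : String) : Bool :=
  PySem.Str.startswith (PySem.Str.lstrip line) "Batch "

def split_into_batch_blocks_py (answer : String) : List String × List (List String) :=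
  if answer = "" then ([], [])
  else
    let lines := PySem.Str.splitlines answer
    let start_indices : List Int :=
      (PySem.List.enumerate lines).foldl
        (fun acc p => if pvIsBatch p.2 then acc ++ [p.1] else acc) []
    if start_indices = [] then (lines, [])
    else
      let header := PySem.List.slice lines none (some (PySem.List.pyGetD start_indices 0 0))
      let blocks : List (List String) :=
        (PySem.List.enumerate start_indices).foldl
          (fun blocks p =>
            let end_i : Int :=
              if p.1 + 1 < (start_indices.length : Int) then
                PySem.List.pyGetD start_indices (p.1 + 1) 0
              else (lines.length : Int)
            blocks ++ [PySem.List.slice lines (some p.2) (some end_i)]) []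
      (header, blocks)

-- ===== PORT B =====
def split_into_batch_blocks_py_alt (answer : String) : List String × List (List String) :=
  let final :=
    (PySem.Str.splitlines answer).foldl
      (fun st line =>
        if pvIsBatch line then
          match st.2.2 with
          | some cur => (st.1, st.2.1 ++ [cur], some [line])
          | none => (st.1, st.2.1, some [line])
        else
          match st.2.2 with
          | some cur => (st.1, st.2.1, some (cur ++ [line]))
          | none => (st.1 ++ [line], st.2.1, none))
      (([] : List String), ([] : List (List String)), (none : Option (List String)))
  match final.2.2 with
  | some cur => (final.1, final.2.1 ++ [cur])
  | none => (final.1, final.2.1)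

-- ===== PRECONDITION & SPEC =====
def Spec_split_into_batch_blocks_py (answer : String) (out : List String × List (List String)) : Prop := out = split_into_batch_blocks_py_alt answer
instance (answer : String) (out : List String × List (List String)) : Decidable (Spec_split_into_batch_blocks_py answer out) := by unfold Spec_split_into_batch_blocks_py; infer_instance

-- ===== CLAIM (what is proved, stated in full; the proofs are below) =====
def Claim_equal_split_into_batch_blocks_py : Prop := ∀ (answer : String), Dom_split_into_batch_blocks_py answer → Spec_split_into_batch_blocks_py answer (split_into_batch_blocks_py answer)

-- ===== LEMMAS AND PROOFS =====

-- reference splitter: per-line recursion both ports are reduced to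
def pvSpec : List String → List String × List (List String)
  | [] => ([], [])
  | l :: ls =>
    let r := pvSpec ls
    if pvIsBatch l then ([], (l :: r.1) :: r.2) else (l :: r.1, r.2)

-- batch-line positions starting at offset s
def pvIdx (s : Nat) : List String → List Nat
  | [] => []
  | l :: ls => if pvIsBatch l then s :: pvIdx (s + 1) ls else pvIdx (s + 1) ls

-- blocks cut out of `lines` at the given start positions
def pvChunk (lines : List String) : List Nat → List (List String)
  | [] => []
  | i :: rest =>
    (lines.drop i).take ((match rest with | [] => lines.length | j :: _ => j) - i) :: pvChunk lines rest

theorem pvIdx_shift (ls : List String) : ∀ s : Nat, pvIdx s ls = (pvIdx 0 ls).map (· + s) := by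
  induction ls with
  | nil => intro s; simp [pvIdx]
  | cons l ls ih =>
    intro s
    have hc : ∀ (X : List Nat) (t : Nat), (X.map (· + 1)).map (· + t) = X.map (· + (t + 1)) := by
      intro X t
      rw [List.map_map]
      exact List.map_congr_left (fun a _ => by simp [Function.comp]; omega)
    by_cases h : pvIsBatch l
    · simp [pvIdx, h, ih (s + 1), ih 1, hc]
    · simp [pvIdx, h, ih (s + 1), ih 1, hc]

theorem A_idx_fold (ls : List String) : ∀ (s : Nat) (acc : List Int),
    (PySem.List.enumerate ls (s : Int)).foldl
      (fun acc p => if pvIsBatch p.2 then acc ++ [p.1] else acc) acc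
    = acc ++ (pvIdx s ls).map (fun (n : Nat) => (n : Int)) := by
  induction ls with
  | nil => intro s acc; simp [PySem.List.enumerate_nil, pvIdx]
  | cons l ls ih =>
    intro s acc
    rw [PySem.List.enumerate_cons]
    have hs : ((s : Int) + 1) = ((s + 1 : Nat) : Int) := by push_cast; ring
    by_cases h : pvIsBatch l
    · simp only [List.foldl_cons, h, if_pos, hs]
      rw [ih (s + 1)]
      simp [pvIdx, h]
    · simp only [List.foldl_cons, h, Bool.false_eq_true, ite_false, hs]
      rw [ih (s + 1)]
      simp [pvIdx, h]

theorem A_blocks_fold (lines : List String) (si : List Nat) :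
    ∀ (cur pre : List Nat) (acc : List (List String)), si = pre ++ cur →
    (PySem.List.enumerate (cur.map (fun (n : Nat) => (n : Int))) (pre.length : Int)).foldl
      (fun blocks p =>
        let end_i : Int :=
          if p.1 + 1 < ((si.map (fun (n : Nat) => (n : Int))).length : Int) then
            PySem.List.pyGetD (si.map (fun (n : Nat) => (n : Int))) (p.1 + 1) 0
          else (lines.length : Int)
        blocks ++ [PySem.List.slice lines (some p.2) (some end_i)]) acc
    = acc ++ pvChunk lines cur := by
  intro cur
  induction cur with
  | nil => intro pre acc h; simp [PySem.List.enumerate_nil, pvChunk]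
  | cons i rest ih =>
    intro pre acc h
    rw [List.map_cons, PySem.List.enumerate_cons, List.foldl_cons]
    cases rest with
    | nil =>
      have hcond : ¬ ((pre.length : Int) + 1 < ((si.map (fun (n : Nat) => (n : Int))).length : Int)) := by
        subst h
        simp only [List.length_map, List.length_append, List.length_cons, List.length_nil]
        push_cast
        omega
      simp only [List.map_nil, PySem.List.enumerate_nil, List.foldl_nil]
      rw [if_neg hcond, PySem.List.slice_natCast]
      simp [pvChunk]
    | cons j r =>
      have hcond : ((pre.length : Int) + 1 < ((si.map (fun (n : Nat) => (n : Int))).length : Int)) := by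
        subst h
        simp only [List.length_map, List.length_append, List.length_cons]
        push_cast
        omega
      have hget : PySem.List.pyGetD (si.map (fun (n : Nat) => (n : Int))) ((pre.length : Int) + 1) 0 = (j : Int) := by
        have h1 : ((pre.length : Int) + 1) = ((pre.length + 1 : Nat) : Int) := by push_cast; ring
        rw [h1, PySem.List.pyGetD_natCast, h]
        simp [List.getD_eq_getElem?_getD]
      dsimp only
      rw [if_pos hcond, hget, PySem.List.slice_natCast]
      have hpre : si = (pre ++ [i]) ++ (j :: r) := by simp [h]
      have hc : ((pre.length : Int) + 1) = (((pre ++ [i]).length : Nat) : Int) := by simp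
      rw [hc, ih (pre ++ [i]) (acc ++ [(lines.drop i).take (j - i)]) hpre]
      simp [pvChunk]

theorem pvChunk_shift (l : String) (ls : List String) (si : List Nat) :
    pvChunk (l :: ls) (si.map (· + 1)) = pvChunk ls si := by
  induction si with
  | nil => simp [pvChunk]
  | cons i rest ih =>
    cases rest with
    | nil => simp [pvChunk, List.drop_succ_cons]
    | cons j r =>
      simp only [List.map_cons, pvChunk, List.drop_succ_cons] at ih ⊢
      rw [ih]
      congr 2
      omega

theorem Acore_eq_spec (ls : List String) :
    (if pvIdx 0 ls = [] then (ls, ([] : List (List String)))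
     else (ls.take ((pvIdx 0 ls).headI), pvChunk ls (pvIdx 0 ls))) = pvSpec ls := by
  induction ls with
  | nil => simp [pvIdx, pvSpec]
  | cons l ls ih =>
    have hsh : pvIdx 1 ls = (pvIdx 0 ls).map (· + 1) := pvIdx_shift ls 1
    have hchsh := pvChunk_shift l ls (pvIdx 0 ls)
    by_cases h : pvIsBatch l
    · rw [show pvIdx 0 (l :: ls) = 0 :: (pvIdx 0 ls).map (· + 1) from by simp [pvIdx, h, hsh]]
      rw [if_neg (by simp)]
      rw [show pvSpec (l :: ls) = ([], (l :: (pvSpec ls).1) :: (pvSpec ls).2) from by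
        simp [pvSpec, h]]
      cases h0 : pvIdx 0 ls with
      | nil =>
        rw [h0] at ih
        simp only [reduceIte] at ih
        rw [← ih]
        simp [pvChunk]
      | cons i0 rest =>
        rw [h0] at ih hchsh
        rw [if_neg (by simp)] at ih
        rw [← ih]
        rw [show pvChunk (l :: ls) (0 :: ((i0 :: rest).map (· + 1)))
            = ((l :: ls).take (i0 + 1)) :: pvChunk (l :: ls) ((i0 :: rest).map (· + 1)) from by
          simp [pvChunk]]
        rw [hchsh]
        simp [List.headI]
    · simp only [pvIdx, h, Bool.false_eq_true, ite_false, hsh, pvSpec]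
      cases h0 : pvIdx 0 ls with
      | nil =>
        rw [h0] at ih
        simp only [reduceIte] at ih
        simp [← ih]
      | cons i0 rest =>
        rw [h0] at ih
        rw [if_neg (by simp)] at ih
        rw [if_neg (by simp)]
        rw [pvChunk_shift l ls (i0 :: rest)]
        rw [← ih]
        simp [List.headI]

def pvStep (st : List String × List (List String) × Option (List String)) (line : String) :
    List String × List (List String) × Option (List String) :=
  if pvIsBatch line then
    match st.2.2 with
    | some cur => (st.1, st.2.1 ++ [cur], some [line])
    | none => (st.1, st.2.1, some [line])
  else
    match st.2.2 with
    | some cur => (st.1, st.2.1, some (cur ++ [line]))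
    | none => (st.1 ++ [line], st.2.1, none)

def pvFin (st : List String × List (List String) × Option (List String)) :
    List String × List (List String) :=
  match st.2.2 with
  | some cur => (st.1, st.2.1 ++ [cur])
  | none => (st.1, st.2.1)

theorem B_fold (ls : List String) : ∀ (header : List String) (blocks : List (List String))
    (cur? : Option (List String)),
    pvFin (ls.foldl pvStep (header, blocks, cur?))
    = (match cur? with
       | some cur => (header, blocks ++ (cur ++ (pvSpec ls).1) :: (pvSpec ls).2)
       | none => (header ++ (pvSpec ls).1, blocks ++ (pvSpec ls).2)) := by
  induction ls with
  | nil =>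
    intro header blocks cur?
    cases cur? <;> simp [pvFin, pvSpec]
  | cons l ls ih =>
    intro header blocks cur?
    rw [List.foldl_cons]
    by_cases h : pvIsBatch l
    · cases cur? with
      | none =>
        simp only [pvStep, h, if_pos]
        rw [ih]
        simp [pvSpec, h]
      | some cur =>
        simp only [pvStep, h, if_pos]
        rw [ih]
        simp [pvSpec, h]
    · cases cur? with
      | none =>
        simp only [pvStep, h, Bool.false_eq_true, ite_false]
        rw [ih]
        simp [pvSpec, h]
      | some cur =>
        simp only [pvStep, h, Bool.false_eq_true, ite_false]
        rw [ih]
        simp [pvSpec, h]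

theorem B_eq_spec (answer : String) :
    split_into_batch_blocks_py_alt answer = pvSpec (PySem.Str.splitlines answer) := by
  have h : split_into_batch_blocks_py_alt answer
      = pvFin ((PySem.Str.splitlines answer).foldl pvStep ([], [], none)) := rfl
  rw [h, B_fold]
  simp

-- ===== VERDICT (by name: the statement is the Claim_ definition above) =====
theorem split_into_batch_blocks_py_spec : Claim_equal_split_into_batch_blocks_py := by
  intro answer _
  show split_into_batch_blocks_py answer = split_into_batch_blocks_py_alt answer
  rw [B_eq_spec]
  unfold split_into_batch_blocks_py
  by_cases he : answer = ""
  · rw [if_pos he, he]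
    have : PySem.Str.splitlines "" = [] := rfl
    rw [this]
    rfl
  · rw [if_neg he]
    simp only []
    have hidx := A_idx_fold (PySem.Str.splitlines answer) 0 []
    simp only [Nat.cast_zero] at hidx
    rw [hidx]
    simp only [List.nil_append]
    rw [← Acore_eq_spec (PySem.Str.splitlines answer)]
    cases h0 : pvIdx 0 (PySem.Str.splitlines answer) with
    | nil => simp
    | cons i0 rest =>
      rw [if_neg (by simp), if_neg (by simp)]
      have hblocks := A_blocks_fold (PySem.Str.splitlines answer) (i0 :: rest) (i0 :: rest) [] [] rfl
      simp only [List.length_nil, Nat.cast_zero] at hblocks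
      rw [hblocks]
      have hhead : PySem.List.pyGetD ((i0 :: rest).map (fun (n : Nat) => (n : Int))) 0 0 = (i0 : Int) := by
        simp [PySem.List.pyGetD_zero_cons]
      rw [List.map_cons] at hhead ⊢
      rw [hhead, PySem.List.slice_to_natCast]
      simp [List.headI]
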